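-- pv_equiv track=rewrite | github.com/giorgia-nadizar/nca-vsr-classification | nca_run.py | shape_to_string
-- ===== SOURCE A (Python) =====
-- from typing import List, Tuple
--
-- def shape_to_string(shape: List[List[int]]):
--   mi = min([row.index(1) for row in shape if 1 in row])
--   ma = max([len(row) - 1 - row[::-1].index(1) for row in shape if 1 in row])
--   strings = []
--   for row in shape:
--     if 1 in row:
--       strings.append(''.join(str(row[k]) for k in range(mi, ma + 1)))
--   return '-'.join(strings)
-- ===== SOURCE B (Python) =====
-- def shape_to_string(shape):
--   rows = [row for row in shape if 1 in row]
--   width = max(map(len, rows))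
--   grid = [row + [0] * (width - len(row)) for row in rows]
--   while all(row[-1] != 1 for row in grid):
--     grid = [row[:-1] for row in grid]
--   while all(row[0] != 1 for row in grid):
--     grid = [row[1:] for row in grid]
--   return '-'.join(''.join(map(str, row)) for row in grid)
-- ===== Notes on version B (the rewrite author's own statement) =====
-- stated objective: alternative
-- what changed: B never computes the column bounds mi/ma: it pads the 1-containing rows to a rectangular grid, then repeatedly strips the last column while no row ends in a 1 and the first column while no row starts with a 1, and serializes the trimmed grid rows directly; A instead computes mi/ma as min/max of per-row first/last indices of 1 and serializes by indexing each row over range(mi, ma+1).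
-- outside the precondition, e.g. on shape_to_string([]): A raises ValueError, B raises ValueError; on shape_to_string([[1], [0, 0, 1]]): A raises IndexError, B returns '100-001'
import Mathlib
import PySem

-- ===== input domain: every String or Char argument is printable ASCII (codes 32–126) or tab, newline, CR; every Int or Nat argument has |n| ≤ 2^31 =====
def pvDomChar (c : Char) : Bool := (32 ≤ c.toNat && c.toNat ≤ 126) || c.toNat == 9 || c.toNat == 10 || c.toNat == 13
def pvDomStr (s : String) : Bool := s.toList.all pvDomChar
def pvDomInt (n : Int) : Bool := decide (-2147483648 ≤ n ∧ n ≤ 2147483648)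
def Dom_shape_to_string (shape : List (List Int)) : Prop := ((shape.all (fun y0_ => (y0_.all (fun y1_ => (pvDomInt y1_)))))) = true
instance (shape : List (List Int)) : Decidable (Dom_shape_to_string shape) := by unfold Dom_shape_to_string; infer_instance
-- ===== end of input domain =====

-- B never computes the column bounds: it pads the 1-containing rows to a rectangle and
-- repeatedly strips the last column while no row ends in 1 and then the first column while
-- no row starts with 1, serializing the trimmed grid rows directly; equal return on Pre_.

-- ===== PORT A =====
-- row[::-1] is ported as row.reverse; row.index(1) / row[k] are PySem.List.index? / pyGet?,
-- total via .getD only where the guard '1 in row' (resp. Pre_) makes Python not raise.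
def shape_to_string (shape : List (List Int)) : String :=
  let mi : Int :=
    (PySem.List.min? ((shape.filter (fun row => row.contains 1)).map
        (fun row => (((PySem.List.index? row 1).getD 0 : Nat) : Int))) (fun x => x)).getD 0
  let ma : Int :=
    (PySem.List.max? ((shape.filter (fun row => row.contains 1)).map
        (fun row => (row.length : Int) - 1 - (((PySem.List.index? row.reverse 1).getD 0 : Nat) : Int))) (fun x => x)).getD 0
  let strings : List String := shape.foldl (fun acc row =>
    if row.contains 1 then
      acc ++ [PySem.Str.join "" ((PySem.List.pyRange mi (ma + 1) 1).map
        (fun k => PySem.Int.toStr ((PySem.List.pyGet? row k).getD 0)))]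
    else acc) []
  PySem.Str.join "-" strings

-- ===== PORT B =====
-- the two while-loops of Source B, with fuel (the initial grid width bounds the number of
-- iterations of each loop); row[-1] / row[0] are getLast? / head? (never none on Pre_ inputs)
def pvRtrim : Nat → List (List Int) → List (List Int)
  | 0, g => g
  | fuel + 1, g =>
    if g.all (fun row => !(row.getLast? == some (1 : Int))) then
      pvRtrim fuel (g.map List.dropLast)
    else g

def pvLtrim : Nat → List (List Int) → List (List Int)
  | 0, g => g
  | fuel + 1, g =>
    if g.all (fun row => !(row.head? == some (1 : Int))) then
      pvLtrim fuel (g.map (List.drop 1))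
    else g

def shape_to_string_alt (shape : List (List Int)) : String :=
  let rows := shape.filter (fun row => row.contains 1)
  let width : Nat := ((PySem.List.max? (rows.map (fun r => (r.length : Int))) (fun x => x)).getD 0).toNat
  let grid0 := rows.map (fun row => row ++ List.replicate (width - row.length) 0)
  let grid1 := pvRtrim width grid0
  let grid2 := pvLtrim width grid1
  PySem.Str.join "-" (grid2.map (fun row => PySem.Str.join "" (row.map PySem.Int.toStr)))

-- ===== PRECONDITION & SPEC =====
-- Pre_ excludes exactly the inputs where Python A raises: grids with no 1 anywhere
-- (ValueError from min([])) and ragged grids where some 1 sits in a column that is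
-- out of range for another 1-containing row (IndexError from row[k]).
def Pre_shape_to_string (shape : List (List Int)) : Prop :=
  (∃ r ∈ shape, (1 : Int) ∈ r) ∧
  ∀ r ∈ shape, (1 : Int) ∈ r → ∀ r' ∈ shape, ∀ k ∈ List.range r'.length, r'.getD k 0 = 1 → k < r.length
instance (shape : List (List Int)) : Decidable (Pre_shape_to_string shape) := by
  unfold Pre_shape_to_string; infer_instance
def pvWitness_shape_to_string : List (List Int) := [[0, 1], [1, 0]]

def Spec_shape_to_string (shape : List (List Int)) (out : String) : Prop := out = shape_to_string_alt shape
instance (shape : List (List Int)) (out : String) : Decidable (Spec_shape_to_string shape out) := by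
  unfold Spec_shape_to_string; infer_instance

-- ===== CLAIM (what is proved, stated in full; the proofs are below) =====
def Claim_equal_shape_to_string : Prop := ∀ (shape : List (List Int)), Dom_shape_to_string shape → Pre_shape_to_string shape → Spec_shape_to_string shape (shape_to_string shape)

-- ===== LEMMAS AND PROOFS =====

-- proof-only abbreviations
def pvRows (shape : List (List Int)) : List (List Int) := shape.filter (fun row => row.contains 1)
def pvPad (w : Nat) (r : List Int) : List Int := r ++ List.replicate (w - r.length) 0
def pvMis (shape : List (List Int)) : List Int :=
  (shape.filter (fun row => row.contains 1)).map
    (fun row => (((PySem.List.index? row 1).getD 0 : Nat) : Int))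
def pvMas (shape : List (List Int)) : List Int :=
  (shape.filter (fun row => row.contains 1)).map
    (fun row => (row.length : Int) - 1 - (((PySem.List.index? row.reverse 1).getD 0 : Nat) : Int))
-- the set of columns holding a 1, as a list of Ints (for relating both ports' bounds)
def pvCols (shape : List (List Int)) : List Int :=
  shape.flatMap (fun row =>
    ((PySem.List.enumerate row 0).filter (fun p => p.2 == 1)).map (fun p => p.1))

lemma mem_enumerate_iff {α : Type} (xs : List α) (s k : Int) (v : α) :
    (k, v) ∈ PySem.List.enumerate xs s ↔ ∃ j : Nat, ∃ h : j < xs.length, k = s + j ∧ xs[j] = v := by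
  induction xs generalizing s with
  | nil => simp [PySem.List.enumerate]
  | cons x t ih =>
    rw [PySem.List.enumerate_cons]
    simp only [List.mem_cons]
    constructor
    · rintro (h | h)
      · simp at h
        exact ⟨0, by simp, by simp [h.1], by simp [h.2]⟩
      · rcases (ih (s + 1)).mp h with ⟨j, hj, hk, hv⟩
        exact ⟨j + 1, by simpa using Nat.succ_lt_succ hj, by push_cast; omega, by simpa using hv⟩
    · rintro ⟨j, hj, hk, hv⟩
      cases j with
      | zero =>
        left
        simp at hk hv
        rw [hk, hv]
      | succ j =>
        right
        exact (ih (s + 1)).mpr ⟨j, by simpa using Nat.lt_of_succ_lt_succ hj, by push_cast at hk ⊢; omega, by simpa using hv⟩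

lemma mem_pvCols_iff (shape : List (List Int)) (k : Int) :
    k ∈ pvCols shape ↔ ∃ r ∈ shape, ∃ j : Nat, ∃ h : j < r.length, r[j] = 1 ∧ k = (j : Int) := by
  simp only [pvCols, List.mem_flatMap, List.mem_map, List.mem_filter]
  constructor
  · rintro ⟨r, hr, ⟨ki, v⟩, ⟨hmem, hv⟩, hk⟩
    simp at hv hk
    rcases (mem_enumerate_iff r 0 ki v).mp hmem with ⟨j, hj, hki, hval⟩
    exact ⟨r, hr, j, hj, by rw [hval, hv], by omega⟩
  · rintro ⟨r, hr, j, hj, hval, hk⟩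
    exact ⟨r, hr, ((j : Int), (1 : Int)),
      ⟨(mem_enumerate_iff r 0 j 1).mpr ⟨j, hj, by omega, hval⟩, by simp⟩, by simp [hk]⟩

-- every per-row first index of 1 is the column of a 1
lemma mis_subset_cols (shape : List (List Int)) :
    ∀ x ∈ pvMis shape, x ∈ pvCols shape := by
  intro x hx
  simp only [pvMis, List.mem_map, List.mem_filter] at hx
  obtain ⟨r, ⟨hr, hc⟩, hx⟩ := hx
  have h1 : (1 : Int) ∈ r := by simpa using hc
  obtain ⟨i, hi⟩ := Option.isSome_iff_exists.mp ((PySem.List.index?_isSome_iff r 1).mpr h1)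
  obtain ⟨hk, hval, _⟩ := PySem.List.getElem_of_index?_eq_some hi
  exact (mem_pvCols_iff shape x).mpr ⟨r, hr, i, hk, hval, by rw [← hx, hi]; rfl⟩

-- every column of a 1 is bounded below by that row's first index of 1
lemma cols_lower (shape : List (List Int)) :
    ∀ y ∈ pvCols shape, ∃ x ∈ pvMis shape, x ≤ y := by
  intro y hy
  obtain ⟨r, hr, j, hj, hval, hy⟩ := (mem_pvCols_iff shape y).mp hy
  have h1 : (1 : Int) ∈ r := hval ▸ List.getElem_mem hj
  obtain ⟨i, hi⟩ := Option.isSome_iff_exists.mp ((PySem.List.index?_isSome_iff r 1).mpr h1)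
  obtain ⟨hk, _, hmin⟩ := PySem.List.getElem_of_index?_eq_some hi
  have hij : i ≤ j := by
    by_contra h
    exact hmin j (by omega) hval
  refine ⟨(i : Int), ?_, by omega⟩
  simp only [pvMis, List.mem_map, List.mem_filter]
  exact ⟨r, ⟨hr, by simpa using h1⟩, by rw [hi]; rfl⟩

-- every per-row last index of 1 is the column of a 1
lemma mas_subset_cols (shape : List (List Int)) :
    ∀ x ∈ pvMas shape, x ∈ pvCols shape := by
  intro x hx
  simp only [pvMas, List.mem_map, List.mem_filter] at hx
  obtain ⟨r, ⟨hr, hc⟩, hx⟩ := hx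
  have h1 : (1 : Int) ∈ r.reverse := by simpa using hc
  obtain ⟨i, hi⟩ := Option.isSome_iff_exists.mp ((PySem.List.index?_isSome_iff r.reverse 1).mpr h1)
  obtain ⟨hk, hval, _⟩ := PySem.List.getElem_of_index?_eq_some hi
  have hkr : i < r.length := by simpa using hk
  have hval' : r[r.length - 1 - i]'(by omega) = 1 := by
    rw [← List.getElem_reverse]; exact hval
  refine (mem_pvCols_iff shape x).mpr ⟨r, hr, r.length - 1 - i, by omega, hval', ?_⟩
  rw [← hx, hi]
  simp only [Option.getD_some]
  omega

-- every column of a 1 is bounded above by that row's last index of 1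
lemma cols_upper (shape : List (List Int)) :
    ∀ y ∈ pvCols shape, ∃ x ∈ pvMas shape, y ≤ x := by
  intro y hy
  obtain ⟨r, hr, j, hj, hval, hy⟩ := (mem_pvCols_iff shape y).mp hy
  have h1 : (1 : Int) ∈ r := hval ▸ List.getElem_mem hj
  have h1r : (1 : Int) ∈ r.reverse := by simpa using h1
  obtain ⟨i, hi⟩ := Option.isSome_iff_exists.mp ((PySem.List.index?_isSome_iff r.reverse 1).mpr h1r)
  obtain ⟨hk, _, hmin⟩ := PySem.List.getElem_of_index?_eq_some hi
  have hkr : i < r.length := by simpa using hk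
  have hrev : r.reverse[r.length - 1 - j]'(by simp; omega) = 1 := by
    rw [List.getElem_reverse]
    have he : r.length - 1 - (r.length - 1 - j) = j := by omega
    simp only [he]
    exact hval
  have hij : i ≤ r.length - 1 - j := by
    by_contra h
    exact hmin (r.length - 1 - j) (by omega) hrev
  refine ⟨(r.length : Int) - 1 - (i : Int), ?_, by omega⟩
  simp only [pvMas, List.mem_map, List.mem_filter]
  exact ⟨r, ⟨hr, by simpa using h1⟩, by rw [hi]; rfl⟩

lemma cols_ne_nil (shape : List (List Int)) (hne : ∃ r ∈ shape, (1 : Int) ∈ r) :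
    pvCols shape ≠ [] := by
  obtain ⟨r, hr, h1⟩ := hne
  obtain ⟨j, hj, hval⟩ := List.mem_iff_getElem.mp h1
  exact List.ne_nil_of_mem ((mem_pvCols_iff shape j).mpr ⟨r, hr, j, hj, hval, rfl⟩)

lemma mis_ne_nil (shape : List (List Int)) (hne : ∃ r ∈ shape, (1 : Int) ∈ r) :
    pvMis shape ≠ [] := by
  obtain ⟨r, hr, h1⟩ := hne
  apply List.ne_nil_of_mem (a := (((PySem.List.index? r 1).getD 0 : Nat) : Int))
  simp only [pvMis, List.mem_map, List.mem_filter]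
  exact ⟨r, ⟨hr, by simpa using h1⟩, rfl⟩

lemma mas_ne_nil (shape : List (List Int)) (hne : ∃ r ∈ shape, (1 : Int) ∈ r) :
    pvMas shape ≠ [] := by
  obtain ⟨r, hr, h1⟩ := hne
  apply List.ne_nil_of_mem (a := (r.length : Int) - 1 - (((PySem.List.index? r.reverse 1).getD 0 : Nat) : Int))
  simp only [pvMas, List.mem_map, List.mem_filter]
  exact ⟨r, ⟨hr, by simpa using h1⟩, rfl⟩

lemma min_eq (shape : List (List Int)) (hne : ∃ r ∈ shape, (1 : Int) ∈ r) :
    PySem.List.min? (pvMis shape) (fun x => x) = PySem.List.min? (pvCols shape) (fun x => x) := by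
  rcases hA : PySem.List.min? (pvMis shape) (fun x => x) with _ | mA
  · exact absurd ((PySem.List.min?_eq_none_iff _ _).mp hA) (mis_ne_nil shape hne)
  rcases hB : PySem.List.min? (pvCols shape) (fun x => x) with _ | mB
  · exact absurd ((PySem.List.min?_eq_none_iff _ _).mp hB) (cols_ne_nil shape hne)
  have h1 : mB ≤ mA :=
    PySem.List.min?_isMin hB _ (mis_subset_cols shape _ (PySem.List.min?_mem hA))
  obtain ⟨x, hx, hxle⟩ := cols_lower shape _ (PySem.List.min?_mem hB)
  have h2 : mA ≤ mB := le_trans (PySem.List.min?_isMin hA _ hx) hxle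
  simp [le_antisymm h2 h1]

lemma max_eq (shape : List (List Int)) (hne : ∃ r ∈ shape, (1 : Int) ∈ r) :
    PySem.List.max? (pvMas shape) (fun x => x) = PySem.List.max? (pvCols shape) (fun x => x) := by
  rcases hA : PySem.List.max? (pvMas shape) (fun x => x) with _ | mA
  · exact absurd ((PySem.List.max?_eq_none_iff _ _).mp hA) (mas_ne_nil shape hne)
  rcases hB : PySem.List.max? (pvCols shape) (fun x => x) with _ | mB
  · exact absurd ((PySem.List.max?_eq_none_iff _ _).mp hB) (cols_ne_nil shape hne)
  have h1 : mA ≤ mB :=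
    PySem.List.max?_isMax hB _ (mas_subset_cols shape _ (PySem.List.max?_mem hA))
  obtain ⟨x, hx, hxle⟩ := cols_upper shape _ (PySem.List.max?_mem hB)
  have h2 : mB ≤ mA := le_trans hxle (PySem.List.max?_isMax hA _ hx)
  simp [le_antisymm h1 h2]

lemma A_eq (shape : List (List Int)) :
    shape_to_string shape = PySem.Str.join "-" ((pvRows shape).map
      (fun row => PySem.Str.join ""
        ((PySem.List.pyRange ((PySem.List.min? (pvMis shape) (fun x => x)).getD 0)
            ((PySem.List.max? (pvMas shape) (fun x => x)).getD 0 + 1) 1).map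
          (fun k => PySem.Int.toStr ((PySem.List.pyGet? row k).getD 0))))) := by
  simp only [shape_to_string]
  rw [PySem.List.foldl_append_if]
  simp [pvMis, pvMas, pvRows]

-- B-side: basic facts about padded rows
lemma pad_length (w : Nat) (r : List Int) (h : r.length ≤ w) : (pvPad w r).length = w := by
  simp [pvPad]; omega

lemma pad_getElem?_one_iff (w : Nat) (r : List Int) (c : Nat) (hle : r.length ≤ w) (hc : c < w) :
    (pvPad w r)[c]? = some 1 ↔ ∃ h : c < r.length, r[c] = 1 := by
  by_cases hcr : c < r.length
  · rw [pvPad.eq_def, List.getElem?_append_left hcr, List.getElem?_eq_getElem hcr]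
    simp [hcr]
  · rw [pvPad.eq_def, List.getElem?_append_right (by omega), List.getElem?_replicate]
    rw [if_pos (by omega)]
    simp only [Option.some.injEq]
    constructor
    · intro h; exact absurd h (by norm_num)
    · rintro ⟨h, _⟩; exact absurd h hcr

lemma pad_getElem_of_lt (w : Nat) (r : List Int) (c : Nat) (hle : r.length ≤ w) (hcr : c < r.length) :
    (pvPad w r)[c]'(by rw [pad_length w r hle]; omega) = r[c] := by
  apply Option.some.inj
  rw [← List.getElem?_eq_getElem (by rw [pad_length w r hle]; omega)]
  rw [pvPad.eq_def, List.getElem?_append_left hcr, List.getElem?_eq_getElem hcr]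

-- a row of the filter is a row of shape containing 1
lemma mem_pvRows (shape : List (List Int)) (r : List Int) (h : r ∈ pvRows shape) :
    r ∈ shape ∧ (1 : Int) ∈ r := by
  have := List.mem_filter.mp h
  exact ⟨this.1, by simpa using this.2⟩

-- a column c < w holds a 1 (in the padded grid) iff c is a 1-column of shape
lemma col_probe (shape : List (List Int)) (w c : Nat)
    (hw : ∀ r ∈ pvRows shape, r.length ≤ w) (hc : c < w) :
    (∃ r ∈ pvRows shape, (pvPad w r)[c]? = some 1) ↔ (c : Int) ∈ pvCols shape := by
  constructor
  · rintro ⟨r, hr, hone⟩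
    obtain ⟨hrs, -⟩ := mem_pvRows shape r hr
    obtain ⟨hcr, hval⟩ := (pad_getElem?_one_iff w r c (hw r hr) hc).mp hone
    exact (mem_pvCols_iff shape c).mpr ⟨r, hrs, c, hcr, hval, rfl⟩
  · intro hmem
    obtain ⟨r, hr, j, hj, hval, hk⟩ := (mem_pvCols_iff shape c).mp hmem
    have hcj : c = j := by omega
    subst hcj
    have hrr : r ∈ pvRows shape := by
      simp only [pvRows, List.mem_filter]
      exact ⟨hr, by simpa using (hval ▸ List.getElem_mem hj : (1 : Int) ∈ r)⟩
    exact ⟨r, hrr, (pad_getElem?_one_iff w r c (hw r hrr) hc).mpr ⟨hj, hval⟩⟩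

-- the right-trim loop truncates every row exactly to column ma (the largest 1-column)
lemma rtrim_eq (shape : List (List Int)) (w ma : Nat)
    (hw : ∀ r ∈ pvRows shape, r.length ≤ w)
    (hmem : (ma : Int) ∈ pvCols shape)
    (hmax : ∀ c : Nat, (c : Int) ∈ pvCols shape → c ≤ ma) :
    ∀ fuel L, ma + 1 ≤ L → L ≤ w → L ≤ ma + 1 + fuel →
      pvRtrim fuel ((pvRows shape).map (fun r => (pvPad w r).take L))
        = (pvRows shape).map (fun r => (pvPad w r).take (ma + 1)) := by
  intro fuel
  induction fuel with
  | zero =>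
    intro L h1 _ h3
    have : L = ma + 1 := by omega
    subst this; rfl
  | succ fuel ih =>
    intro L h1 h2 h3
    have hgl : ∀ r, r ∈ pvRows shape →
        ((pvPad w r).take L).getLast? = (pvPad w r)[L - 1]? := by
      intro r hr
      have hlen : ((pvPad w r).take L).length = L := by
        rw [List.length_take, pad_length w r (hw r hr)]; omega
      rw [List.getLast?_eq_getElem?, hlen, List.getElem?_take, if_pos (by omega)]
    have hcond : (((pvRows shape).map (fun r => (pvPad w r).take L)).all
        (fun row => !(row.getLast? == some (1 : Int)))) = true
        ↔ ¬ ((L - 1 : Nat) : Int) ∈ pvCols shape := by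
      rw [List.all_map, List.all_eq_true]
      rw [← col_probe shape w (L - 1) hw (by omega)]
      constructor
      · rintro h ⟨r, hr, hone⟩
        have := h r hr
        rw [Function.comp_apply, hgl r hr] at this
        simp only [Bool.not_eq_eq_eq_not, Bool.not_true, beq_eq_false_iff_ne, ne_eq] at this
        exact this hone
      · intro h r hr
        rw [Function.comp_apply, hgl r hr]
        simp only [Bool.not_eq_eq_eq_not, Bool.not_true, beq_eq_false_iff_ne, ne_eq]
        intro hone
        exact h ⟨r, hr, hone⟩
    by_cases hL : L = ma + 1
    · subst hL
      have hf : ¬ (((pvRows shape).map (fun r => (pvPad w r).take (ma + 1))).all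
          (fun row => !(row.getLast? == some (1 : Int)))) = true := by
        rw [hcond]
        simpa using hmem
      rw [pvRtrim, if_neg hf]
    · have hnot : ¬ ((L - 1 : Nat) : Int) ∈ pvCols shape := by
        intro hm
        have := hmax (L - 1) hm
        omega
      rw [pvRtrim, if_pos (hcond.mpr hnot)]
      have hmap : ((pvRows shape).map (fun r => (pvPad w r).take L)).map List.dropLast
          = (pvRows shape).map (fun r => (pvPad w r).take (L - 1)) := by
        rw [List.map_map]
        apply List.map_congr_left
        intro r hr
        rw [Function.comp_apply, List.dropLast_eq_take, List.length_take,
          pad_length w r (hw r hr), List.take_take]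
        congr 1
        omega
      rw [hmap]
      exact ih (L - 1) (by omega) (by omega) (by omega)

-- the left-trim loop drops every row exactly to column mi (the least 1-column)
lemma ltrim_eq (shape : List (List Int)) (w mi ma : Nat)
    (hw : ∀ r ∈ pvRows shape, r.length ≤ w)
    (hmem : (mi : Int) ∈ pvCols shape)
    (hmin : ∀ c : Nat, (c : Int) ∈ pvCols shape → mi ≤ c)
    (hmima : mi ≤ ma) (hmaw : ma < w) :
    ∀ fuel d, d ≤ mi → mi ≤ d + fuel →
      pvLtrim fuel ((pvRows shape).map (fun r => ((pvPad w r).take (ma + 1)).drop d))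
        = (pvRows shape).map (fun r => ((pvPad w r).take (ma + 1)).drop mi) := by
  intro fuel
  induction fuel with
  | zero =>
    intro d h1 h2
    have : d = mi := by omega
    subst this; rfl
  | succ fuel ih =>
    intro d h1 h2
    have hhd : ∀ r, r ∈ pvRows shape →
        (((pvPad w r).take (ma + 1)).drop d).head? = (pvPad w r)[d]? := by
      intro r hr
      rw [List.head?_drop, List.getElem?_take, if_pos (by omega)]
    have hcond : (((pvRows shape).map (fun r => ((pvPad w r).take (ma + 1)).drop d)).all
        (fun row => !(row.head? == some (1 : Int)))) = true
        ↔ ¬ (d : Int) ∈ pvCols shape := by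
      rw [List.all_map, List.all_eq_true]
      rw [← col_probe shape w d hw (by omega)]
      constructor
      · rintro h ⟨r, hr, hone⟩
        have := h r hr
        rw [Function.comp_apply, hhd r hr] at this
        simp only [Bool.not_eq_eq_eq_not, Bool.not_true, beq_eq_false_iff_ne, ne_eq] at this
        exact this hone
      · intro h r hr
        rw [Function.comp_apply, hhd r hr]
        simp only [Bool.not_eq_eq_eq_not, Bool.not_true, beq_eq_false_iff_ne, ne_eq]
        intro hone
        exact h ⟨r, hr, hone⟩
    by_cases hd : d = mi
    · subst hd
      rw [pvLtrim, if_neg (by rw [hcond]; simpa using hmem)]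
    · have hnot : ¬ (d : Int) ∈ pvCols shape := by
        intro hm
        have := hmin d hm
        omega
      rw [pvLtrim, if_pos (hcond.mpr hnot)]
      have hmap : ((pvRows shape).map (fun r => ((pvPad w r).take (ma + 1)).drop d)).map (List.drop 1)
          = (pvRows shape).map (fun r => ((pvPad w r).take (ma + 1)).drop (d + 1)) := by
        rw [List.map_map]
        apply List.map_congr_left
        intro r hr
        rw [Function.comp_apply, List.drop_drop]
      rw [hmap]
      exact ih (d + 1) (by omega) (by omega)

-- ===== VERDICT (by name: the statement is the Claim_ definition above) =====
theorem shape_to_string_spec : Claim_equal_shape_to_string := by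
  intro shape _ hPre
  obtain ⟨hne, hbound⟩ := hPre
  show shape_to_string shape = shape_to_string_alt shape
  -- the two extrema, as elements of pvCols
  rcases hmB : PySem.List.min? (pvCols shape) (fun x => x) with _ | mB
  · exact absurd ((PySem.List.min?_eq_none_iff _ _).mp hmB) (cols_ne_nil shape hne)
  rcases hMB : PySem.List.max? (pvCols shape) (fun x => x) with _ | MB
  · exact absurd ((PySem.List.max?_eq_none_iff _ _).mp hMB) (cols_ne_nil shape hne)
  have hcols_nonneg : ∀ c ∈ pvCols shape, 0 ≤ c := by
    intro c hc
    obtain ⟨r, hr, j, hj, hval, hk⟩ := (mem_pvCols_iff shape c).mp hc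
    omega
  have hmB0 : 0 ≤ mB := hcols_nonneg _ (PySem.List.min?_mem hmB)
  have hMB0 : 0 ≤ MB := hcols_nonneg _ (PySem.List.max?_mem hMB)
  have hmMB : mB ≤ MB := PySem.List.min?_isMin hmB _ (PySem.List.max?_mem hMB)
  set mi : Nat := mB.toNat with hmi
  set ma : Nat := MB.toNat with hma
  have hmiMem : (mi : Int) ∈ pvCols shape := by
    have : (mi : Int) = mB := by omega
    rw [this]; exact PySem.List.min?_mem hmB
  have hmaMem : (ma : Int) ∈ pvCols shape := by
    have : (ma : Int) = MB := by omega
    rw [this]; exact PySem.List.max?_mem hMB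
  have hmaMax : ∀ c : Nat, (c : Int) ∈ pvCols shape → c ≤ ma := by
    intro c hc
    have := PySem.List.max?_isMax hMB _ hc
    simp only at this; omega
  have hmiMin : ∀ c : Nat, (c : Int) ∈ pvCols shape → mi ≤ c := by
    intro c hc
    have := PySem.List.min?_isMin hmB _ hc
    simp only at this; omega
  -- the width computed by B
  have hrne : pvRows shape ≠ [] := by
    obtain ⟨r, hr, h1⟩ := hne
    exact List.ne_nil_of_mem (List.mem_filter.mpr ⟨hr, by simpa using h1⟩)
  rcases hWm : PySem.List.max? ((pvRows shape).map (fun r => (r.length : Int))) (fun x => x) with _ | Wm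
  · exact absurd ((PySem.List.max?_eq_none_iff _ _).mp hWm) (by simpa using hrne)
  have hWm0 : 0 ≤ Wm := by
    have := PySem.List.max?_mem hWm
    simp only [List.mem_map] at this
    obtain ⟨r, _, hr⟩ := this
    omega
  set w : Nat := Wm.toNat with hwdef
  have hw : ∀ r ∈ pvRows shape, r.length ≤ w := by
    intro r hr
    have := PySem.List.max?_isMax hWm _ (List.mem_map.mpr ⟨r, hr, rfl⟩)
    simp only at this; omega
  -- ma < length of every qualifying row (Pre_), hence ma < w
  have hmaLen : ∀ r ∈ pvRows shape, ma < r.length := by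
    intro r hr
    obtain ⟨hrs, h1⟩ := mem_pvRows shape r hr
    obtain ⟨r', hr', j, hj, hval, hk⟩ := (mem_pvCols_iff shape (ma : Int)).mp hmaMem
    have := hbound r hrs h1 r' hr' j (List.mem_range.mpr hj)
      (by rw [List.getD_eq_getElem r' 0 hj]; exact hval)
    omega
  have hmaw : ma < w := by
    obtain ⟨r, hr⟩ := List.exists_mem_of_ne_nil _ hrne
    exact lt_of_lt_of_le (hmaLen r hr) (hw r hr)
  -- rewrite A
  rw [A_eq, min_eq shape hne, max_eq shape hne, hmB, hMB]
  -- rewrite B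
  show _ = shape_to_string_alt shape
  simp only [shape_to_string_alt]
  rw [show shape.filter (fun row => row.contains 1) = pvRows shape from rfl]
  rw [hWm]
  simp only [Option.getD_some]
  rw [← hwdef]
  have hgrid0 : (pvRows shape).map (fun row => row ++ List.replicate (w - row.length) 0)
      = (pvRows shape).map (fun r => (pvPad w r).take w) := by
    apply List.map_congr_left
    intro r hr
    rw [show r ++ List.replicate (w - r.length) 0 = pvPad w r from rfl]
    rw [List.take_of_length_le (by rw [pad_length w r (hw r hr)])]
  rw [hgrid0]
  rw [rtrim_eq shape w ma hw hmaMem hmaMax w w (by omega) le_rfl (by omega)]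
  have hdrop0 : (pvRows shape).map (fun r => (pvPad w r).take (ma + 1))
      = (pvRows shape).map (fun r => ((pvPad w r).take (ma + 1)).drop 0) := by
    apply List.map_congr_left
    intro r _
    rw [List.drop_zero]
  rw [hdrop0]
  rw [ltrim_eq shape w mi ma hw hmiMem hmiMin (by omega) hmaw w 0 (by omega) (by omega)]
  -- per-row equality
  congr 1
  rw [List.map_map]
  apply List.map_congr_left
  intro row hrow
  rw [Function.comp_apply]
  congr 1
  -- list of serialized cells: A's range-indexing vs B's trimmed padded row
  apply List.ext_getElem
  · simp only [List.length_map, PySem.List.length_pyRange_one, List.length_drop,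
      List.length_take, pad_length w row (hw row hrow)]
    omega
  · intro i h1 h2
    simp only [List.length_map, PySem.List.length_pyRange_one] at h1
    simp only [List.getElem_map]
    rw [PySem.List.getElem_pyRange_one]
    have hcast : mB + (i : Int) = ((mi + i : Nat) : Int) := by omega
    rw [hcast, PySem.List.pyGet?_natCast]
    have hlt : mi + i < row.length := by
      have := hmaLen row hrow
      omega
    rw [List.getElem?_eq_getElem hlt]
    simp only [Option.getD_some]
    congr 1
    rw [List.getElem_drop, List.getElem_take]
    rw [pad_getElem_of_lt w row (mi + i) (hw row hrow) hlt]
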